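-- pv_equiv track=rewrite | github.com/pFindStudio/pDeep3 | pDeep/sequence/peptide.py | gen_mod_dict
-- ===== SOURCE A (Python) =====
-- anyNterm = "AnyN-term"
--
-- def replace_Nterm(siteaa):
--     if "N-term" in siteaa:
--         return anyNterm
--     else:
--         return siteaa
--
-- def gen_mod_dict(modlist):
--     mod_dict = {}
--
--     def get_mod_AA(mod):
--         return mod[mod.rfind('[') + 1:mod.rfind(']')]
--
--     for mod in modlist:
--         siteaa = get_mod_AA(mod)
--         siteaa = replace_Nterm(siteaa)
--         if siteaa not in mod_dict:
--             mod_dict[siteaa] = [mod]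
--         else:
--             mod_dict[siteaa].append(mod)
--     return mod_dict
-- ===== SOURCE B (Python) =====
-- anyNterm = "AnyN-term"
--
--
-- def gen_mod_dict(modlist):
--     def key(mod):
--         aa = mod[mod.rfind('[') + 1:mod.rfind(']')]
--         return anyNterm if "N-term" in aa else aa
--
--     keys = [key(mod) for mod in modlist]
--     order = list(dict.fromkeys(keys))
--     return {k: [m for m, km in zip(modlist, keys) if km == k] for k in order}
-- ===== Notes on version B (the rewrite author's own statement) =====
-- stated objective: alternative
-- what changed: B maps each mod to its group key, dedups the keys in first-occurrence order, and builds each bucket by filtering the zipped (mod, key) list, instead of A's one-pass dict build with insert/append branching.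
import Mathlib
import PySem

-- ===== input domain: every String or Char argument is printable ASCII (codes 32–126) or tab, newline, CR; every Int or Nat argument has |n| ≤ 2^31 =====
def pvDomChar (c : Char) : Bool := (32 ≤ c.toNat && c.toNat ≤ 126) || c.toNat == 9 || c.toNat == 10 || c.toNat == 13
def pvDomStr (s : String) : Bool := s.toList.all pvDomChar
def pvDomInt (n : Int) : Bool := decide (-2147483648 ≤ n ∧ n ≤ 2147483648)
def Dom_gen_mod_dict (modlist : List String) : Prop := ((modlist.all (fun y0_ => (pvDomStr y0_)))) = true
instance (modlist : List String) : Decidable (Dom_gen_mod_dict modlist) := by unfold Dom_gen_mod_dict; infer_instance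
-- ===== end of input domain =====

-- B groups by key via dedup-in-first-occurrence-order plus a per-key filter instead of A's
-- incremental dict insert/append loop; same result, a different decomposition (not faster).

-- ===== PORT A =====
def replace_Nterm (siteaa : String) : String :=
  if PySem.Str.isIn "N-term" siteaa then "AnyN-term" else siteaa

-- mod[mod.rfind('[') + 1 : mod.rfind(']')]
def get_mod_AA (mod : String) : String :=
  PySem.Str.slice mod (some (PySem.Str.rfind mod "[" + 1)) (some (PySem.Str.rfind mod "]"))

def gen_mod_dict (modlist : List String) : List (String × List String) :=
  (modlist.foldl (fun mod_dict mod =>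
      let siteaa := replace_Nterm (get_mod_AA mod)
      if mod_dict.contains siteaa = false then
        mod_dict.insert siteaa [mod]                      -- mod_dict[siteaa] = [mod]
      else
        mod_dict.modify siteaa [] (fun l => l ++ [mod]))  -- mod_dict[siteaa].append(mod)
    PySem.Dict.empty).items

-- ===== PORT B =====
def modKey (mod : String) : String :=
  let aa := PySem.Str.slice mod (some (PySem.Str.rfind mod "[" + 1)) (some (PySem.Str.rfind mod "]"))
  if PySem.Str.isIn "N-term" aa then "AnyN-term" else aa

def gen_mod_dict_alt (modlist : List String) : List (String × List String) :=
  let keys := modlist.map modKey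
  (PySem.List.dedup keys).map (fun k =>
    (k, ((modlist.zip keys).filter (fun p => p.2 == k)).map (·.1)))

-- ===== PRECONDITION & SPEC =====
def Spec_gen_mod_dict (modlist : List String) (out : List (String × List String)) : Prop := out = gen_mod_dict_alt modlist
instance (modlist : List String) (out : List (String × List String)) : Decidable (Spec_gen_mod_dict modlist out) := by unfold Spec_gen_mod_dict; infer_instance

-- ===== CLAIM (what is proved, stated in full; the proofs are below) =====
def Claim_equal_gen_mod_dict : Prop := ∀ (modlist : List String), Dom_gen_mod_dict modlist → Spec_gen_mod_dict modlist (gen_mod_dict modlist)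

-- ===== LEMMAS AND PROOFS =====

-- A's loop body is exactly the grouping step 'd[k] = d.get(k, []) + [mod]'.
theorem step_eq_modify (d : PySem.Dict String (List String)) (mod : String) :
    (let siteaa := replace_Nterm (get_mod_AA mod)
     if d.contains siteaa = false then d.insert siteaa [mod]
     else d.modify siteaa [] (fun l => l ++ [mod]))
    = d.modify (modKey mod) [] (fun l => l ++ [mod]) := by
  have hkey : replace_Nterm (get_mod_AA mod) = modKey mod := rfl
  simp only [hkey]
  by_cases h : d.contains (modKey mod) = false
  · simp [h, PySem.Dict.modify, PySem.Dict.getD_of_not_contains d _ h]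
  · simp [h]

-- the zipped-filter bucket of B equals the pair-filter bucket coming from the dict
theorem bucket_eq {a b : Type} [BEq b] (f : a -> b) (l : List a) (k : b) :
    ((l.map (fun m => (f m, m))).filter (fun p => p.1 == k)).map (fun p => p.2)
    = ((l.zip (l.map f)).filter (fun p => p.2 == k)).map (fun p => p.1) := by
  induction l with
  | nil => rfl
  | cons m ms ih =>
      simp only [List.map_cons, List.zip_cons_cons, List.filter_cons]
      by_cases h : (f m == k) = true
      · simp [h, ih]
      · simp [h, ih]

-- ===== VERDICT (by name: the statement is the Claim_ definition above) =====
theorem gen_mod_dict_spec : Claim_equal_gen_mod_dict := by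
  intro modlist _
  show gen_mod_dict modlist = gen_mod_dict_alt modlist
  unfold gen_mod_dict gen_mod_dict_alt
  show _ = (PySem.List.dedup (modlist.map modKey)).map (fun k =>
    (k, ((modlist.zip (modlist.map modKey)).filter (fun p => p.2 == k)).map (fun p => p.1)))
  have hstep :
      (fun (d : PySem.Dict String (List String)) (mod : String) =>
        (let siteaa := replace_Nterm (get_mod_AA mod)
         if d.contains siteaa = false then d.insert siteaa [mod]
         else d.modify siteaa [] (fun l => l ++ [mod])))
      = fun d mod => d.modify (modKey mod) [] (fun l => l ++ [mod]) := by
    funext d mod; exact step_eq_modify d mod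
  rw [hstep]
  have hnd : (modlist.foldl (fun d mod => d.modify (modKey mod) [] (fun l => l ++ [mod]))
      PySem.Dict.empty).keys.Nodup :=
    PySem.Dict.nodup_keys_foldl_modify_key modlist modKey [] (fun _ mod => (· ++ [mod]))
      PySem.Dict.empty (by simp)
  rw [PySem.Dict.items_eq_map_keys _ hnd []]
  have hkeys : (modlist.foldl (fun d mod => d.modify (modKey mod) [] (fun l => l ++ [mod]))
      PySem.Dict.empty).keys = PySem.List.dedup (modlist.map modKey) := by
    rw [PySem.Dict.keys_foldl_modify_key modlist modKey [] (fun _ mod => (· ++ [mod]))]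
    rfl
  rw [hkeys]
  refine List.map_congr_left (fun k _ => ?_)
  have hfold : modlist.foldl (fun d mod => d.modify (modKey mod) [] (fun l => l ++ [mod]))
      PySem.Dict.empty
      = (modlist.map (fun m => (modKey m, m))).foldl
          (fun d p => d.modify p.1 [] (fun l => l ++ [p.2])) PySem.Dict.empty := by
    rw [List.foldl_map]
  rw [hfold, PySem.Dict.getD_foldl_modify_append]
  simp only [PySem.Dict.getD_empty, List.nil_append]
  rw [bucket_eq modKey]
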